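-- pv_equiv track=rewrite | github.com/mn-48/Codeforces | CF/10May2024/F.py | solve
-- ===== SOURCE A (Python) =====
-- def solve(x):
--     res = x-1
--     j = x-1
--     for i in range(1, x):
--         while i*i + j*j >= x*x:
--             j-=1
--         res+=j
--     return res*4+1
-- ===== SOURCE B (Python) =====
-- from math import isqrt
--
-- def solve(x):
--     res = x - 1
--     for i in range(1, x):
--         res += isqrt(x*x - i*i - 1)
--     return res*4 + 1
-- ===== Notes on version B (the rewrite author's own statement) =====
-- stated objective: simpler
-- what changed: Replaced the maintained monotone pointer j and its nested while loop by an independent per-term integer square root: each term is isqrt(x*x - i*i - 1), so no cross-iteration state is kept.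
import Mathlib
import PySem

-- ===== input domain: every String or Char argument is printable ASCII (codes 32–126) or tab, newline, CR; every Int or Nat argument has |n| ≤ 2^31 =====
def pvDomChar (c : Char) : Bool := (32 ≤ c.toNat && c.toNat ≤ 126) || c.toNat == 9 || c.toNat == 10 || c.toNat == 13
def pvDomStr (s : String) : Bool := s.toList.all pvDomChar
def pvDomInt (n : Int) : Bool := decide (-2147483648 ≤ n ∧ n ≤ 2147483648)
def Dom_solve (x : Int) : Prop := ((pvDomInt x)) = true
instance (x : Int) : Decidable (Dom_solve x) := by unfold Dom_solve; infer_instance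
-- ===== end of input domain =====

-- B replaces A's maintained monotone pointer j (with its nested while loop) by an
-- independent integer-square-root term per iteration — simpler, no cross-iteration state.


-- ===== PORT A =====
-- the inner 'while i*i + j*j >= x*x: j -= 1' of A; fuel j.toNat+1 always suffices on
-- A's actual calls (j descends from x-1 and stops at a nonnegative value)
def solveWhile (n : Nat) (x i j : Int) : Int :=
  match n with
  | 0 => j
  | n+1 => if i*i + j*j ≥ x*x then solveWhile n x i (j-1) else j

def solve (x : Int) : Int :=
  let st := (PySem.List.pyRange 1 x 1).foldl
      (fun (s : Int × Int) i =>
        let j' := solveWhile (s.2.toNat + 1) x i s.2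
        (s.1 + j', j')) (x-1, x-1)
  st.1 * 4 + 1

-- ===== PORT B =====
-- math.isqrt n  =  Nat.sqrt (n ≥ 0 on every call B makes)
def solve_alt (x : Int) : Int :=
  let res := (PySem.List.pyRange 1 x 1).foldl
      (fun (r : Int) i => r + ((Nat.sqrt (x*x - i*i - 1).toNat : Nat) : Int)) (x-1)
  res * 4 + 1

-- ===== PRECONDITION & SPEC =====
def Spec_solve (x : Int) (out : Int) : Prop := out = solve_alt x
instance (x : Int) (out : Int) : Decidable (Spec_solve x out) := by unfold Spec_solve; infer_instance

-- ===== CLAIM (what is proved, stated in full; the proofs are below) =====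
def Claim_equal_solve : Prop := ∀ (x : Int), Dom_solve x → Spec_solve x (solve x)

-- ===== LEMMAS AND PROOFS =====

-- B's per-term value
def tgt (x i : Int) : Int := ((Nat.sqrt (x*x - i*i - 1).toNat : Nat) : Int)

lemma tgt_nonneg (x i : Int) : 0 ≤ tgt x i := Int.natCast_nonneg _

lemma tgt_sq_le (x i : Int) (h : 0 ≤ x*x - i*i - 1) :
    i*i + tgt x i * tgt x i < x*x := by
  have h1 : ((Nat.sqrt (x*x - i*i - 1).toNat : Nat) : Int) ^ 2
      ≤ ((x*x - i*i - 1).toNat : Int) := by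
    exact_mod_cast Nat.sqrt_le' (x*x - i*i - 1).toNat
  rw [Int.toNat_of_nonneg h] at h1
  unfold tgt; nlinarith [h1]

lemma tgt_succ_sq (x i k : Int) (hk : tgt x i < k) :
    i*i + k*k ≥ x*x := by
  have h0 : 0 ≤ tgt x i := tgt_nonneg x i
  have h1 : ((x*x - i*i - 1).toNat : Int) < (((Nat.sqrt (x*x - i*i - 1).toNat : Nat) : Int) + 1) ^ 2 := by
    exact_mod_cast Nat.lt_succ_sqrt' (x*x - i*i - 1).toNat
  have h2 : x*x - i*i - 1 ≤ ((x*x - i*i - 1).toNat : Int) := Int.self_le_toNat _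
  have h3 : (tgt x i + 1) * (tgt x i + 1) ≤ k * k := by
    have hk1 : tgt x i + 1 ≤ k := hk
    exact mul_le_mul hk1 hk1 (by omega) (by omega)
  unfold tgt at *
  nlinarith [h1, h2, h3]

lemma tgt_mono (x a : Int) (h1 : 1 ≤ a) : tgt x (a+1) ≤ tgt x a := by
  unfold tgt
  have h : (x*x - (a+1)*(a+1) - 1).toNat ≤ (x*x - a*a - 1).toNat := by
    apply Int.toNat_le_toNat; nlinarith
  exact_mod_cast Nat.sqrt_le_sqrt h

lemma tgt_lt (x : Int) (hx : 1 < x) : tgt x 1 ≤ x - 1 := by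
  have h0 : 0 ≤ tgt x 1 := tgt_nonneg x 1
  have h : 0 ≤ x*x - 1*1 - 1 := by nlinarith
  have := tgt_sq_le x 1 h
  by_contra hc
  push Not at hc
  nlinarith

-- the while loop reaches exactly tgt x i when started at or above it
lemma solveWhile_eq (x i : Int) : ∀ (n : Nat) (j : Int), tgt x i ≤ j →
    i*i + tgt x i * tgt x i < x*x → (j - tgt x i).toNat < n →
    solveWhile n x i j = tgt x i := by
  intro n
  induction n with
  | zero => intro j _ _ h; omega
  | succ n ih =>
    intro j hle hlt hfuel
    unfold solveWhile
    by_cases hj : tgt x i < j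
    · rw [if_pos (tgt_succ_sq x i j hj)]
      exact ih (j-1) (by omega) hlt (by omega)
    · have hje : j = tgt x i := by omega
      subst hje
      rw [if_neg (by omega)]

-- fold invariant: starting from any j ≥ tgt x a, A's fold over [a, x) matches B's fold
lemma fold_eq (x : Int) : ∀ (n : Nat) (a r j : Int), (x - a).toNat = n → 1 ≤ a →
    a ≤ x → tgt x a ≤ j →
    ((PySem.List.pyRange a x 1).foldl
      (fun (s : Int × Int) i =>
        let j' := solveWhile (s.2.toNat + 1) x i s.2
        (s.1 + j', j')) (r, j)).1
    = (PySem.List.pyRange a x 1).foldl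
        (fun (r : Int) i => r + ((Nat.sqrt (x*x - i*i - 1).toNat : Nat) : Int)) r := by
  intro n
  induction n with
  | zero =>
    intro a r j hn _ _ _
    rw [PySem.List.pyRange_one_eq_nil (by omega)]
    rfl
  | succ n ih =>
    intro a r j hn h1 h2 hj
    have hax : a < x := by omega
    rw [PySem.List.pyRange_one_cons hax]
    simp only [List.foldl_cons]
    have hpos : 0 ≤ x*x - a*a - 1 := by nlinarith
    have hlt : a*a + tgt x a * tgt x a < x*x := tgt_sq_le x a hpos
    have h0 : 0 ≤ tgt x a := tgt_nonneg x a
    have hw : solveWhile (j.toNat + 1) x a j = tgt x a :=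
      solveWhile_eq x a _ _ hj hlt (by omega)
    rw [hw]
    by_cases hax2 : a + 1 < x
    · have := ih (a+1) (r + tgt x a) (tgt x a) (by omega) (by omega) (by omega)
        (tgt_mono x a h1)
      simpa [tgt] using this
    · rw [PySem.List.pyRange_one_eq_nil (by omega)]
      rfl

-- ===== VERDICT (by name: the statement is the Claim_ definition above) =====
theorem solve_spec : Claim_equal_solve := by
  intro x _
  unfold Spec_solve solve solve_alt
  by_cases hx : 1 < x
  · show ((PySem.List.pyRange 1 x 1).foldl
        (fun (s : Int × Int) i =>
          let j' := solveWhile (s.2.toNat + 1) x i s.2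
          (s.1 + j', j')) (x-1, x-1)).1 * 4 + 1
      = (PySem.List.pyRange 1 x 1).foldl
          (fun (r : Int) i => r + ((Nat.sqrt (x*x - i*i - 1).toNat : Nat) : Int)) (x-1) * 4 + 1
    rw [fold_eq x (x - 1).toNat 1 (x-1) (x-1) (by omega) (by omega) (by omega) (tgt_lt x hx)]
  · show ((PySem.List.pyRange 1 x 1).foldl
        (fun (s : Int × Int) i =>
          let j' := solveWhile (s.2.toNat + 1) x i s.2
          (s.1 + j', j')) (x-1, x-1)).1 * 4 + 1
      = (PySem.List.pyRange 1 x 1).foldl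
          (fun (r : Int) i => r + ((Nat.sqrt (x*x - i*i - 1).toNat : Nat) : Int)) (x-1) * 4 + 1
    rw [PySem.List.pyRange_one_eq_nil (by omega)]
    rfl
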